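-- pv_equiv track=rewrite | github.com/agruber/insect-pol-iii | scripts/analyze_structure.py | classify_structure
-- ===== SOURCE A (Python) =====
-- def classify_structure(structure: str) -> str:
--     """Classify dot-bracket structure type"""
--     if not structure:
--         return "unpaired"
--
--     open_count = structure.count('(')
--     close_count = structure.count(')')
--
--     # Must have equal opening and closing brackets
--     if open_count != close_count:
--         return "invalid"
--
--     # If no brackets, it's just unpaired
--     if open_count == 0:
--         return "unpaired"
--
--     # Check if structure is balanced
--     if not is_balanced_structure(structure):
--         return "invalid"
--
--     # Check for multiple separate structures
--     if has_separate_structures(structure):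
--         return "invalid"
--
--     # Calculate max nesting depth
--     depth = 0
--     max_depth = 0
--     for char in structure:
--         if char == '(':
--             depth += 1
--             max_depth = max(max_depth, depth)
--         elif char == ')':
--             depth -= 1
--
--     # Check for bulges
--     has_bulges = has_bulges_in_structure(structure)
--
--     # Classify based on depth and bulges
--     if max_depth == 1:
--         return "hairpin_with_bulges" if has_bulges else "hairpin"
--     else:
--         return "nested_with_bulges" if has_bulges else "nested"
--
-- def has_bulges_in_structure(structure: str) -> bool:
--     """Check for bulges (dots at depth > 0)"""
--     depth = 0
--     dots_at_depth = set()
--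
--     for char in structure:
--         if char == '(':
--             depth += 1
--         elif char == ')':
--             depth -= 1
--         elif char == '.':
--             dots_at_depth.add(depth)
--
--     # If we have dots at depth > 0, there are bulges
--     return any(d > 0 for d in dots_at_depth)
--
-- def has_separate_structures(structure: str) -> bool:
--     """Check for separate structures (disconnected hairpins)"""
--     depth = 0
--     found_complete_structure = False
--
--     for i, char in enumerate(structure):
--         if char == '(':
--             depth += 1
--         elif char == ')':
--             depth -= 1
--             if depth == 0:
--                 if found_complete_structure:
--                     return True
--                 found_complete_structure = True
--                 # Check if there are more opening brackets ahead
--                 if '(' in structure[i+1:]: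
--                     return True
--
--     return False
--
-- def is_balanced_structure(structure: str) -> bool:
--     """Check if structure has proper bracket matching"""
--     depth = 0
--     for char in structure:
--         if char == '(':
--             depth += 1
--         elif char == ')':
--             depth -= 1
--             if depth < 0:
--                 return False
--     return depth == 0
-- ===== SOURCE B (Python) =====
-- def classify_structure(structure: str) -> str:
--     """Classify dot-bracket structure type (single left-to-right pass)."""
--     depth = 0
--     max_depth = 0
--     bulge = False
--     components = 0
--     seen_open = False
--     for ch in structure:
--         if ch == '(':
--             depth += 1
--             seen_open = True
--             if depth > max_depth:
--                 max_depth = depth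
--         elif ch == ')':
--             depth -= 1
--             if depth < 0:
--                 return "invalid"
--             if depth == 0:
--                 components += 1
--         elif ch == '.' and depth > 0:
--             bulge = True
--     if depth != 0:
--         return "invalid"
--     if not seen_open:
--         return "unpaired"
--     if components > 1:
--         return "invalid"
--     if max_depth == 1:
--         return "hairpin_with_bulges" if bulge else "hairpin"
--     return "nested_with_bulges" if bulge else "nested"
-- ===== Notes on version B (the rewrite author's own statement) =====
-- stated objective: simpler
-- what changed: B replaces A's five separate scans (two bracket counts, a balance check, a separate-structure check with a lookahead substring search, a depth loop and a set-building bulge loop) by one left-to-right pass maintaining depth, max depth, a bulge flag, a component counter and a seen-open flag, classifying after the loop.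
import Mathlib
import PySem

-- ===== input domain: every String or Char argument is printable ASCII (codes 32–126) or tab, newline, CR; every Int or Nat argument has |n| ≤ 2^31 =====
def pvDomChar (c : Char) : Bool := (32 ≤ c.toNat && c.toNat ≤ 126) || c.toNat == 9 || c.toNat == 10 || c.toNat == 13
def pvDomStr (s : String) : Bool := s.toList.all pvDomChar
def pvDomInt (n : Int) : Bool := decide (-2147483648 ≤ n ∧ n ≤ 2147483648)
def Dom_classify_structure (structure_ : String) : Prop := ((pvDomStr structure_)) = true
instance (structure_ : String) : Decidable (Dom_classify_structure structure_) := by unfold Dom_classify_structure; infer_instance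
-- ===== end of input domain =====

-- B fuses A's five separate passes (two counts, balance check, separate-structure check,
-- depth loop, bulge loop) into one left-to-right scan; objective: simpler/faster by constant factor.

-- ===== PORT A =====

-- is_balanced_structure: loop over chars with depth, early return False on depth < 0
def pvIsBalancedAux : List Char → Int → Bool
  | [], d => d == 0
  | c :: r, d =>
    if c = '(' then pvIsBalancedAux r (d + 1)
    else if c = ')' then
      if d - 1 < 0 then false else pvIsBalancedAux r (d - 1)
    else pvIsBalancedAux r d

-- has_separate_structures: the rest of the list IS structure[i+1:]; `'(' in s` for a
-- single-char needle is exactly char membership (List.contains)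
def pvHasSepAux : List Char → Int → Bool → Bool
  | [], _, _ => false
  | c :: r, d, found =>
    if c = '(' then pvHasSepAux r (d + 1) found
    else if c = ')' then
      if d - 1 = 0 then
        if found then true
        else if r.contains '(' then true
        else pvHasSepAux r (d - 1) true
      else pvHasSepAux r (d - 1) found
    else pvHasSepAux r d found

-- has_bulges_in_structure: the loop building the set dots_at_depth
def pvBulgesLoop : List Char → Int → PySem.Set Int → PySem.Set Int
  | [], _, s => s
  | c :: r, d, s =>
    if c = '(' then pvBulgesLoop r (d + 1) s
    else if c = ')' then pvBulgesLoop r (d - 1) s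
    else if c = '.' then pvBulgesLoop r d (PySem.Set.add s d)
    else pvBulgesLoop r d s

-- the max-nesting-depth loop of classify_structure
def pvMaxDepthLoop : List Char → Int → Int → Int
  | [], _, md => md
  | c :: r, d, md =>
    if c = '(' then pvMaxDepthLoop r (d + 1) (max md (d + 1))
    else if c = ')' then pvMaxDepthLoop r (d - 1) md
    else pvMaxDepthLoop r d md

def classify_structure (structure_ : String) : String :=
  let l := structure_.toList
  if l = [] then "unpaired"      -- `if not structure`
  else
    let open_count := PySem.Str.count structure_ "("
    let close_count := PySem.Str.count structure_ ")"
    if open_count ≠ close_count then "invalid"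
    else if open_count = 0 then "unpaired"
    else if ¬ pvIsBalancedAux l 0 then "invalid"
    else if pvHasSepAux l 0 false then "invalid"
    else
      let max_depth := pvMaxDepthLoop l 0 0
      -- any(d > 0 for d in dots_at_depth)
      let has_bulges := (pvBulgesLoop l 0 PySem.Set.empty).any (fun d => decide (0 < d))
      if max_depth = 1 then (if has_bulges then "hairpin_with_bulges" else "hairpin")
      else (if has_bulges then "nested_with_bulges" else "nested")

-- ===== PORT B =====

-- single pass: depth, max_depth, bulge flag, component count, seen_open;
-- the [] case is Source B's post-loop classification
def pvAltAux : List Char → Int → Int → Bool → Int → Bool → String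
  | [], d, md, bulge, comps, seen =>
    if d ≠ 0 then "invalid"
    else if !seen then "unpaired"
    else if 1 < comps then "invalid"
    else if md = 1 then (if bulge then "hairpin_with_bulges" else "hairpin")
    else (if bulge then "nested_with_bulges" else "nested")
  | c :: r, d, md, bulge, comps, seen =>
    if c = '(' then pvAltAux r (d + 1) (max md (d + 1)) bulge comps true
    else if c = ')' then
      if d - 1 < 0 then "invalid"
      else pvAltAux r (d - 1) md bulge (if d - 1 = 0 then comps + 1 else comps) seen
    else if c = '.' ∧ 0 < d then pvAltAux r d md true comps seen
    else pvAltAux r d md bulge comps seen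

def classify_structure_alt (structure_ : String) : String :=
  pvAltAux structure_.toList 0 0 false 0 false

-- ===== PRECONDITION & SPEC =====
def Spec_classify_structure (structure_ : String) (out : String) : Prop := out = classify_structure_alt structure_
instance (structure_ : String) (out : String) : Decidable (Spec_classify_structure structure_ out) := by unfold Spec_classify_structure; infer_instance

-- ===== CLAIM (what is proved, stated in full; the proofs are below) =====
def Claim_equal_classify_structure : Prop := ∀ (structure_ : String), Dom_classify_structure structure_ → Spec_classify_structure structure_ (classify_structure structure_)

-- ===== LEMMAS AND PROOFS =====

-- literal-char if reductions (proof-only)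
theorem pvIte1 {α : Type} (a b : α) : (if ('(' : Char) = '(' then a else b) = a := if_pos rfl
theorem pvIte2 {α : Type} (a b : α) : (if (')' : Char) = '(' then a else b) = b := if_neg (by decide)
theorem pvIte3 {α : Type} (a b : α) : (if (')' : Char) = ')' then a else b) = a := if_pos rfl
theorem pvIte4 {α : Type} (a b : α) : (if ('.' : Char) = '(' then a else b) = b := if_neg (by decide)
theorem pvIte5 {α : Type} (a b : α) : (if ('.' : Char) = ')' then a else b) = b := if_neg (by decide)
theorem pvIte6 {α : Type} (a b : α) : (if ('.' : Char) = '.' then a else b) = a := if_pos rfl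

-- reference quantities (proof-only)
def pvDlt : List Char → Int
  | [] => 0
  | c :: r => (if c = '(' then 1 else if c = ')' then -1 else 0) + pvDlt r

def pvOk : List Char → Int → Bool
  | [], _ => true
  | c :: r, d =>
    if c = '(' then pvOk r (d + 1)
    else if c = ')' then (!(d - 1 < 0)) && pvOk r (d - 1)
    else pvOk r d

def pvBul : List Char → Int → Bool
  | [], _ => false
  | c :: r, d =>
    if c = '(' then pvBul r (d + 1)
    else if c = ')' then pvBul r (d - 1)
    else (decide (c = '.' ∧ 0 < d)) || pvBul r d

def pvCmp : List Char → Int → Int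
  | [], _ => 0
  | c :: r, d =>
    if c = '(' then pvCmp r (d + 1)
    else if c = ')' then (if d - 1 = 0 then 1 + pvCmp r 0 else pvCmp r (d - 1))
    else pvCmp r d

def pvFinB (d md : Int) (bulge : Bool) (comps : Int) (seen : Bool) : String :=
  if d ≠ 0 then "invalid"
  else if !seen then "unpaired"
  else if 1 < comps then "invalid"
  else if md = 1 then (if bulge then "hairpin_with_bulges" else "hairpin")
  else (if bulge then "nested_with_bulges" else "nested")

theorem pvAltAux_eq (l : List Char) : ∀ (d md : Int) (bulge : Bool) (comps : Int) (seen : Bool),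
    pvAltAux l d md bulge comps seen =
      if pvOk l d then
        pvFinB (d + pvDlt l) (pvMaxDepthLoop l d md) (bulge || pvBul l d)
          (comps + pvCmp l d) (seen || l.contains '(')
      else "invalid" := by
  induction l with
  | nil => intro d md bulge comps seen; simp [pvAltAux, pvOk, pvDlt, pvMaxDepthLoop, pvBul, pvCmp, pvFinB]
  | cons c r ih =>
    intro d md bulge comps seen
    by_cases hc : c = '('
    · subst hc
      simp only [pvAltAux, pvOk, pvDlt, pvMaxDepthLoop, pvBul, pvCmp, pvIte1, pvIte2, pvIte3, pvIte4, pvIte5, pvIte6, ih]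
      by_cases hok : pvOk r (d + 1) = true
      · simp only [hok, if_true, List.contains_cons]
        have h1 : d + 1 + pvDlt r = d + (1 + pvDlt r) := by omega
        rw [h1]
        simp
      · simp [hok]
    · by_cases hc2 : c = ')'
      · subst hc2
        simp only [pvAltAux, pvOk, pvDlt, pvMaxDepthLoop, pvBul, pvCmp, pvIte1, pvIte2, pvIte3, pvIte4, pvIte5, pvIte6]
        by_cases hneg : d - 1 < 0
        · simp [hneg]
        · simp only [if_neg hneg, ih]
          by_cases hok : pvOk r (d - 1) = true
          · simp only [hok, if_true, hneg, decide_false, Bool.not_false, Bool.true_and,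
              List.contains_cons]
            have h1 : d - 1 + pvDlt r = d + (-1 + pvDlt r) := by omega
            rw [h1]
            have h2 : (if d - 1 = 0 then comps + 1 else comps) + pvCmp r (d - 1)
                = comps + (if d - 1 = 0 then 1 + pvCmp r 0 else pvCmp r (d - 1)) := by
              by_cases hz : d - 1 = 0
              · rw [hz] at *; simp [hz]; omega
              · simp [hz]
            rw [h2]
            simp
          · simp [hok, hneg]
      · simp only [pvAltAux, pvOk, pvDlt, pvMaxDepthLoop, pvBul, pvCmp, if_neg hc, if_neg hc2]
        by_cases hdot : c = '.' ∧ 0 < d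
        · simp only [if_pos hdot, ih]
          by_cases hok : pvOk r d = true
          · simp [hok, hdot, List.contains_cons, Ne.symm hc]
          · simp [hok]
        · simp only [if_neg hdot, ih]
          by_cases hok : pvOk r d = true
          · simp [hok, hdot, List.contains_cons, Ne.symm hc]
          · simp [hok]

-- A's balance check in terms of pvOk and pvDlt
theorem pvIsBal_eq (l : List Char) : ∀ d : Int,
    pvIsBalancedAux l d = (pvOk l d && (d + pvDlt l == 0)) := by
  induction l with
  | nil => intro d; simp [pvIsBalancedAux, pvOk, pvDlt]
  | cons c r ih =>
    intro d
    by_cases hc : c = '('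
    · simp only [pvIsBalancedAux, pvOk, pvDlt, if_pos hc, ih]
      have h1 : d + (1 + pvDlt r) = d + 1 + pvDlt r := by omega
      rw [h1]
    · by_cases hc2 : c = ')'
      · simp only [pvIsBalancedAux, pvOk, pvDlt, if_neg hc, if_pos hc2]
        by_cases hneg : d - 1 < 0
        · simp [hneg]
        · simp only [if_neg hneg, hneg, decide_false, Bool.not_false, Bool.true_and, ih]
          have h1 : d + (-1 + pvDlt r) = d - 1 + pvDlt r := by omega
          rw [h1]
          simp
      · simp [pvIsBalancedAux, pvOk, pvDlt, hc, hc2, ih]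

-- pvDlt as a difference of char counts
theorem pvDlt_counts (l : List Char) :
    pvDlt l = (l.count '(' : Int) - (l.count ')' : Int) := by
  induction l with
  | nil => simp [pvDlt]
  | cons c r ih =>
    by_cases hc : c = '('
    · subst hc; simp [pvDlt, ih, List.count_cons]; omega
    · by_cases hc2 : c = ')'
      · subst hc2; simp [pvDlt, ih, List.count_cons]; omega
      · simp [pvDlt, if_neg hc, if_neg hc2, List.count_cons, Ne.symm hc, Ne.symm hc2, ih]

-- components are nonnegative
theorem pvCmp_nonneg (l : List Char) : ∀ d : Int, 0 ≤ pvCmp l d := by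
  induction l with
  | nil => intro d; simp [pvCmp]
  | cons c r ih =>
    intro d
    by_cases hc : c = '('
    · simp only [pvCmp, if_pos hc]; exact ih _
    · by_cases hc2 : c = ')'
      · simp only [pvCmp, if_neg hc, if_pos hc2]
        by_cases hz : d - 1 = 0
        · simp only [if_pos hz]; have := ih 0; omega
        · simp only [if_neg hz]; exact ih _
      · simp only [pvCmp, if_neg hc, if_neg hc2]; exact ih _

-- in a balanced region that still contains an '(' (or is at positive depth), at least one
-- component closes
theorem pvCmp_ge_one (l : List Char) : ∀ d : Int, pvOk l d = true → 0 ≤ d →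
    d + pvDlt l = 0 → ('(' ∈ l ∨ 0 < d) → 1 ≤ pvCmp l d := by
  induction l with
  | nil =>
    intro d _ _ hsum hor
    simp only [pvDlt] at hsum
    rcases hor with h | h
    · simp at h
    · omega
  | cons c r ih =>
    intro d hok hd hsum hor
    by_cases hc : c = '('
    · simp only [pvOk, if_pos hc] at hok
      simp only [pvDlt, if_pos hc] at hsum
      simp only [pvCmp, if_pos hc]
      exact ih (d + 1) hok (by omega) (by omega) (Or.inr (by omega))
    · by_cases hc2 : c = ')'
      · simp only [pvOk, if_neg hc, if_pos hc2, Bool.and_eq_true, Bool.not_eq_true',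
          decide_eq_false_iff_not] at hok
        simp only [pvDlt, if_neg hc, if_pos hc2] at hsum
        simp only [pvCmp, if_neg hc, if_pos hc2]
        by_cases hz : d - 1 = 0
        · simp only [if_pos hz]; have := pvCmp_nonneg r 0; omega
        · simp only [if_neg hz]
          exact ih (d - 1) hok.2 (by omega) (by omega) (Or.inr (by omega))
      · simp only [pvOk, if_neg hc, if_neg hc2] at hok
        simp only [pvDlt, if_neg hc, if_neg hc2] at hsum
        simp only [pvCmp, if_neg hc, if_neg hc2]
        rcases hor with h | h
        · rcases List.mem_cons.mp h with h' | h'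
          · exact absurd h'.symm hc
          · exact ih d hok hd (by omega) (Or.inl h')
        · exact ih d hok hd (by omega) (Or.inr h)

-- A's separate-structure check counts to the component count
theorem pvHasSep_eq (l : List Char) : ∀ (d : Int) (found : Bool), pvOk l d = true → 0 ≤ d →
    d + pvDlt l = 0 →
    pvHasSepAux l d found = ((found && decide (1 ≤ pvCmp l d)) || decide (2 ≤ pvCmp l d)) := by
  induction l with
  | nil => intro d found _ _ _; simp [pvHasSepAux, pvCmp]
  | cons c r ih =>
    intro d found hok hd hsum
    by_cases hc : c = '('
    · simp only [pvOk, if_pos hc] at hok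
      simp only [pvDlt, if_pos hc] at hsum
      simp only [pvHasSepAux, pvCmp, if_pos hc]
      exact ih (d + 1) found hok (by omega) (by omega)
    · by_cases hc2 : c = ')'
      · simp only [pvOk, if_neg hc, if_pos hc2, Bool.and_eq_true, Bool.not_eq_true',
          decide_eq_false_iff_not] at hok
        simp only [pvDlt, if_neg hc, if_pos hc2] at hsum
        simp only [pvHasSepAux, pvCmp, if_neg hc, if_pos hc2]
        by_cases hz : d - 1 = 0
        · simp only [if_pos hz]
          have hnn := pvCmp_nonneg r 0
          have hok0 : pvOk r 0 = true := by have := hok.2; rwa [hz] at this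
          cases found with
          | true =>
            have h1 : (1:Int) ≤ 1 + pvCmp r 0 := by omega
            simp [h1]
          | false =>
            simp only [Bool.false_and, Bool.false_or, if_neg (by decide : ¬ (false = true))]
            by_cases hcontains : r.contains '(' = true
            · simp only [if_pos hcontains]
              have hmem : '(' ∈ r := by simpa using hcontains
              have h1 : 1 ≤ pvCmp r 0 := pvCmp_ge_one r 0 hok0 le_rfl (by omega) (Or.inl hmem)
              have h2 : (2:Int) ≤ 1 + pvCmp r 0 := by omega
              simp [h2]
            · simp only [if_neg hcontains]
              rw [hz, ih 0 true hok0 le_rfl (by omega)]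
              simp only [Bool.true_and]
              by_cases h1 : (1:Int) ≤ pvCmp r 0
              · have h2 : (2:Int) ≤ 1 + pvCmp r 0 := by omega
                by_cases h3 : (2:Int) ≤ pvCmp r 0 <;> simp [h1, h2, h3]
              · have h2 : ¬ (2:Int) ≤ 1 + pvCmp r 0 := by omega
                have h3 : ¬ (2:Int) ≤ pvCmp r 0 := by omega
                simp [h1, h2, h3]
        · simp only [if_neg hz]
          exact ih (d - 1) found hok.2 (by omega) (by omega)
      · simp only [pvOk, if_neg hc, if_neg hc2] at hok
        simp only [pvDlt, if_neg hc, if_neg hc2] at hsum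
        simp only [pvHasSepAux, pvCmp, if_neg hc, if_neg hc2]
        exact ih d found hok hd (by omega)

-- any over a PySem.Set after add
theorem pvSet_any_add (s : PySem.Set Int) (x : Int) (p : Int → Bool) :
    (PySem.Set.add s x).any p = (s.any p || p x) := by
  unfold PySem.Set.add
  by_cases hmem : x ∈ s
  · rw [if_pos ((PySem.Set.contains_iff s x).mpr hmem)]
    cases hp : p x
    · simp
    · have hany : s.any p = true := List.any_eq_true.mpr ⟨x, hmem, hp⟩
      rw [hany]; simp
  · rw [if_neg (fun h => hmem ((PySem.Set.contains_iff s x).mp h))]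
    simp

-- A's bulge detector equals the single-pass bulge flag
theorem pvBulges_eq (l : List Char) : ∀ (d : Int) (s : PySem.Set Int),
    (pvBulgesLoop l d s).any (fun x => decide (0 < x)) =
      (s.any (fun x => decide (0 < x)) || pvBul l d) := by
  induction l with
  | nil => intro d s; simp [pvBulgesLoop, pvBul]
  | cons c r ih =>
    intro d s
    by_cases hc : c = '('
    · subst hc; simp [pvBulgesLoop, pvBul, ih]
    · by_cases hc2 : c = ')'
      · subst hc2; simp only [pvBulgesLoop, pvBul, pvIte1, pvIte2, pvIte3, pvIte4, pvIte5, pvIte6]; exact ih _ _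
      · by_cases hc3 : c = '.'
        · subst hc3
          rw [show pvBulgesLoop ('.' :: r) d s = pvBulgesLoop r d (PySem.Set.add s d) from by
            simp [pvBulgesLoop]]
          rw [ih d (PySem.Set.add s d), pvSet_any_add]
          simp only [pvBul, pvIte4, pvIte5]
          simp [Bool.or_assoc]
        · simp [pvBulgesLoop, pvBul, hc, hc2, hc3, ih]

-- substring count of a single-char needle is the char count
theorem pvCountGo_singleton (c : Char) (l : List Char) : ∀ (fuel acc : Nat), l.length ≤ fuel →
    PySem.Chars.count.go [c] fuel l acc = acc + l.count c := by
  induction l with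
  | nil =>
    intro fuel acc _
    cases fuel <;> simp [PySem.Chars.count.go]
  | cons h t ih =>
    intro fuel acc hlen
    cases fuel with
    | zero => simp at hlen
    | succ f =>
      have hlen' : t.length ≤ f := by simp at hlen; omega
      have hstep : PySem.Chars.count.go [c] (f + 1) (h :: t) acc
          = if List.isPrefixOf [c] (h :: t)
            then PySem.Chars.count.go [c] f (List.drop (List.length [c]) (h :: t)) (acc + 1)
            else PySem.Chars.count.go [c] f t acc := rfl
      rw [hstep]
      by_cases hph : c = h
      · subst hph
        have hpre : List.isPrefixOf [c] (c :: t) = true := by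
          simp [List.isPrefixOf]
        rw [if_pos hpre]
        simp only [List.length_singleton, List.drop_succ_cons, List.drop_zero]
        rw [ih f (acc + 1) hlen']
        simp [List.count_cons]
        omega
      · have hpre : List.isPrefixOf [c] (h :: t) = false := by
          simp [List.isPrefixOf]
          intro h'
          exact absurd h' hph
        rw [if_neg (by simp [hpre])]
        rw [ih f acc hlen']
        simp [List.count_cons, Ne.symm hph]

theorem pvCount_singleton (l : List Char) (c : Char) :
    PySem.Chars.count l [c] = l.count c := by
  have hstep : PySem.Chars.count l [c] = PySem.Chars.count.go [c] l.length l 0 := by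
    simp [PySem.Chars.count]
  rw [hstep, pvCountGo_singleton c l l.length 0 le_rfl]
  simp

-- if a list has no ')' the balance scan never fails
theorem pvOk_of_no_close (l : List Char) : ∀ d : Int, ')' ∉ l → pvOk l d = true := by
  induction l with
  | nil => intro d _; simp [pvOk]
  | cons c r ih =>
    intro d hmem
    have hc2 : ¬ c = ')' := fun h => hmem (by simp [h])
    have hr : ')' ∉ r := fun h => hmem (by simp [h])
    by_cases hc : c = '('
    · simp only [pvOk, if_pos hc]; exact ih _ hr
    · simp only [pvOk, if_neg hc, if_neg hc2]; exact ih _ hr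

-- ===== VERDICT (by name: the statement is the Claim_ definition above) =====
theorem classify_structure_spec : Claim_equal_classify_structure := by
  intro structure_ _
  unfold Spec_classify_structure
  show classify_structure structure_ = classify_structure_alt structure_
  unfold classify_structure classify_structure_alt
  simp only []
  rw [show PySem.Str.count structure_ "(" = structure_.toList.count '(' from by
    rw [PySem.Str.count_eq]; exact pvCount_singleton _ _]
  rw [show PySem.Str.count structure_ ")" = structure_.toList.count ')' from by
    rw [PySem.Str.count_eq]; exact pvCount_singleton _ _]
  rw [pvAltAux_eq]
  generalize structure_.toList = l
  by_cases hok : pvOk l 0 = true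
  · rw [if_pos hok]
    by_cases hdlt : pvDlt l = 0
    · have hcnt : List.count '(' l = List.count ')' l := by
        have := pvDlt_counts l; omega
      by_cases hopen : List.count '(' l = 0
      · have hnmem : '(' ∉ l := by rwa [← List.count_eq_zero]
        have hcontains : l.contains '(' = false := by simpa using hnmem
        by_cases hnil : l = []
        · subst hnil; simp [pvFinB, pvDlt, pvCmp, pvBul, pvMaxDepthLoop]
        · rw [if_neg hnil]
          have hcz : List.count ')' l = 0 := by omega
          simp [hcnt, hopen, hcz, pvFinB, hdlt, hnmem]
      · have hnil : l ≠ [] := by intro h; subst h; simp at hopen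
        have hmem : '(' ∈ l := by
          by_contra h; exact hopen (List.count_eq_zero.mpr h)
        have hcontains : l.contains '(' = true := by simpa using hmem
        have hbal : (pvOk l 0 && (0 + pvDlt l == 0)) = true := by simp [hok, hdlt]
        rw [if_neg hnil, if_neg (by simp [hcnt]), if_neg hopen, pvIsBal_eq, hbal]
        rw [if_neg (by simp)]
        rw [pvHasSep_eq l 0 false hok le_rfl (by omega)]
        simp only [Bool.false_and, Bool.false_or]
        by_cases h2 : (2:Int) ≤ pvCmp l 0
        · rw [if_pos (by simp [h2])]
          have h1 : (1:Int) < pvCmp l 0 := by omega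
          simp [pvFinB, hdlt, hmem, h1]
        · rw [if_neg (by simp [h2])]
          have hle : ¬ ((1:Int) < pvCmp l 0) := by omega
          rw [pvBulges_eq]
          simp [pvFinB, hdlt, hmem, hle, PySem.Set.empty]
    · have hnil : l ≠ [] := by intro h; subst h; simp [pvDlt] at hdlt
      have hcnt : List.count '(' l ≠ List.count ')' l := by
        have := pvDlt_counts l; omega
      rw [if_neg hnil, if_pos hcnt]
      simp [pvFinB, hdlt]
  · rw [if_neg hok]
    have hokf : pvOk l 0 = false := by simpa using hok
    have hnil : l ≠ [] := by intro h; subst h; simp [pvOk] at hokf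
    rw [if_neg hnil]
    by_cases hcnt : List.count '(' l = List.count ')' l
    · have hopen : List.count '(' l ≠ 0 := by
        intro h0
        have hcz : List.count ')' l = 0 := by omega
        have : ')' ∉ l := List.count_eq_zero.mp hcz
        have := pvOk_of_no_close l 0 this
        rw [this] at hokf; simp at hokf
      rw [if_neg (by simp [hcnt]), if_neg hopen, pvIsBal_eq]
      simp [hokf]
    · rw [if_pos hcnt]
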